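-- pv_equiv track=rewrite | github.com/LeonidSavtchenko/BrainCellNew | Code/Export/PythonCode/Generators/GenForMechComps.py | _wrapInnerCycles
-- ===== SOURCE A (Python) =====
-- def _wrapInnerCycles(lines):
--     outLines = []
--
--     isInsideBlock = False
--     linesBlock = []
--     for line in lines:
--         if ' for ' in line:
--             isInsideBlock = True
--             linesBlock.append(line)
--         elif ' }' in line:
--             linesBlock.append(line)
--             outLines.append('\n'.join(linesBlock))
--             isInsideBlock = False
--             linesBlock = []
--         elif isInsideBlock:
--             linesBlock.append(line)
--         else:
--             outLines.append(line)
--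
--     if isInsideBlock:
--         codeContractViolation()
--
--     return outLines
-- ===== SOURCE B (Python) =====
-- def _wrapInnerCycles(lines):
--     out = []
--     i = 0
--     n = len(lines)
--     while i < n:
--         line = lines[i]
--         if ' for ' in line:
--             block = [line]
--             i += 1
--             closed = False
--             while i < n:
--                 cur = lines[i]
--                 block.append(cur)
--                 i += 1
--                 if ' }' in cur and ' for ' not in cur:
--                     closed = True
--                     break
--             if closed:
--                 out.append('\n'.join(block))
--             else:
--                 codeContractViolation()
--         else:
--             out.append(line)
--             i += 1
--     return out
-- ===== Notes on version B (the rewrite author's own statement) =====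
-- stated objective: alternative
-- what changed: Replaces A's single for-loop with isInsideBlock/linesBlock state variables by an index-driven outer loop that, on seeing a ' for ' line, consumes the whole block in a dedicated inner loop until the closing ' }' line, so no cross-iteration flag or pending-block state survives between lines.
import Mathlib
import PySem

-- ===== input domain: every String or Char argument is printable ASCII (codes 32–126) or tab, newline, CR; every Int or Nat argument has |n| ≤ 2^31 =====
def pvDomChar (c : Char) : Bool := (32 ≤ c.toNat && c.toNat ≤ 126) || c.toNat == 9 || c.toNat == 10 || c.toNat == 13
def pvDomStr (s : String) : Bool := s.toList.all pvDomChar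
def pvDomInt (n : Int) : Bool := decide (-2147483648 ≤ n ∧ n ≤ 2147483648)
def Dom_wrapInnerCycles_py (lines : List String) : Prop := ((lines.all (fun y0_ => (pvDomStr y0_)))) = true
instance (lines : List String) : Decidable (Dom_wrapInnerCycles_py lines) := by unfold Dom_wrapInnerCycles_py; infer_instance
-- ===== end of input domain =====

-- B replaces A's flag-and-accumulator scan by an index-driven outer loop with a
-- dedicated inner loop that consumes each ' for ' block until its closing line
-- (objective: alternative decomposition, same cost).

-- ===== PORT A =====
-- ' for ' in line
def pvHasFor (line : String) : Bool := PySem.Str.isIn " for " line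
-- ' }' in line
def pvHasRb (line : String) : Bool := PySem.Str.isIn " }" line

-- loop body of A: state = (outLines, isInsideBlock, linesBlock)
def pvStepA (s : List String × Bool × List String) (line : String) :
    List String × Bool × List String :=
  if pvHasFor line then (s.1, true, s.2.2 ++ [line])
  else if pvHasRb line then
    (s.1 ++ [PySem.Str.join "\n" (s.2.2 ++ [line])], false, [])
  else if s.2.1 then (s.1, true, s.2.2 ++ [line])
  else (s.1 ++ [line], s.2.1, s.2.2)

-- final 'if isInsideBlock: codeContractViolation()' raises; those inputs are outside Pre_
def wrapInnerCycles_py (lines : List String) : List String :=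
  (lines.foldl pvStepA ([], false, [])).1

-- ===== PORT B =====
-- mutual recursion = B's outer while / inner while; measure is the remaining line list
mutual
  def pvGoB : List String → List String
    | [] => []
    | l :: rest =>
      if pvHasFor l then pvConsumeB [l] rest
      else l :: pvGoB rest
  termination_by xs => xs.length
  -- inner loop: accumulate the block, close on a ' }'-line without ' for '
  def pvConsumeB : List String → List String → List String
    | _, [] => []   -- not closed: codeContractViolation() in Python (outside Pre_)
    | block, l :: rest =>
      if pvHasRb l && !pvHasFor l then
        PySem.Str.join "\n" (block ++ [l]) :: pvGoB rest
      else pvConsumeB (block ++ [l]) rest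
  termination_by _ xs => xs.length
end

def wrapInnerCycles_py_alt (lines : List String) : List String := pvGoB lines

-- ===== PRECONDITION & SPEC =====
-- Pre_ excludes exactly the inputs on which A raises (codeContractViolation, an
-- undefined name): those where some ' for ' line has no later closing line
-- (' }' present, ' for ' absent).
def Pre_wrapInnerCycles_py (lines : List String) : Prop :=
  ∀ i : Fin lines.length, pvHasFor lines[i] = true →
    ∃ j : Fin lines.length, (i : Nat) < j ∧ pvHasRb lines[j] = true ∧ pvHasFor lines[j] = false
instance (lines : List String) : Decidable (Pre_wrapInnerCycles_py lines) := by
  unfold Pre_wrapInnerCycles_py; infer_instance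

def pvWitness_wrapInnerCycles_py : List String :=
  ["int i", "i = 0 for (...) {", "body()", " }", "tail"]

def Spec_wrapInnerCycles_py (lines : List String) (out : List String) : Prop := out = wrapInnerCycles_py_alt lines
instance (lines : List String) (out : List String) : Decidable (Spec_wrapInnerCycles_py lines out) := by unfold Spec_wrapInnerCycles_py; infer_instance

-- ===== CLAIM (what is proved, stated in full; the proofs are below) =====
def Claim_equal_wrapInnerCycles_py : Prop := ∀ (lines : List String), Dom_wrapInnerCycles_py lines → Pre_wrapInnerCycles_py lines → Spec_wrapInnerCycles_py lines (wrapInnerCycles_py lines)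

-- ===== LEMMAS AND PROOFS =====

theorem pv_join_singleton (l : String) : PySem.Str.join "\n" [l] = l := by
  simp [PySem.Str.join]

-- the joint loop invariant: A's fold from a non-inside state matches pvGoB,
-- and from an inside state with pending block matches pvConsumeB
theorem pv_invariant (lines : List String) :
    (∀ out, (lines.foldl pvStepA (out, false, [])).1 = out ++ pvGoB lines) ∧
    (∀ out block, (lines.foldl pvStepA (out, true, block)).1 = out ++ pvConsumeB block lines) := by
  induction lines with
  | nil => simp [pvGoB, pvConsumeB]
  | cons l rest ih =>
    constructor
    · intro out
      by_cases hf : pvHasFor l = true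
      · simp [pvStepA, hf, pvGoB, ih.2]
      · by_cases hr : pvHasRb l = true
        · simp [pvStepA, hf, hr, pvGoB, ih.1, pv_join_singleton]
        · simp [pvStepA, hf, hr, pvGoB, ih.1]
    · intro out block
      by_cases hf : pvHasFor l = true
      · simp [pvStepA, hf, pvConsumeB, ih.2]
      · by_cases hr : pvHasRb l = true
        · simp [pvStepA, hf, hr, pvConsumeB, ih.1]
        · simp [pvStepA, hf, hr, pvConsumeB, ih.2]

-- ===== VERDICT (by name: the statement is the Claim_ definition above) =====
theorem wrapInnerCycles_py_spec : Claim_equal_wrapInnerCycles_py := by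
  intro lines _ _
  show wrapInnerCycles_py lines = wrapInnerCycles_py_alt lines
  unfold wrapInnerCycles_py wrapInnerCycles_py_alt
  simpa using (pv_invariant lines).1 []
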